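-- pv_equiv track=rewrite | github.com/vlaxcs/FMI-INFO-S15-2024-2027 | Anul I - Licenta/Semestrul I/Programarea Algoritmilor/Seminare/Seminarul 3/PP03. Grupe/grupe.py | setGroups
-- ===== SOURCE A (Python) =====
-- def setGroups(fullText):
--
--     words = sorted(set([word for word in fullText.split()]), key=lambda item: (-len(item), item))
--
--     groups = {}
--     for word in words:
--         if len(word) not in groups:
--             groups[len(word)] = [word]
--         else:
--             groups[len(word)] += [word]
--
--     return groups
-- ===== SOURCE B (Python) =====
-- def setGroups(fullText):
--     buckets = {}
--     for word in set(fullText.split()):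
--         buckets.setdefault(len(word), []).append(word)
--     return {n: sorted(buckets[n]) for n in sorted(buckets, reverse=True)}
-- ===== Notes on version B (the rewrite author's own statement) =====
-- stated objective: alternative
-- what changed: Replaces A's single global sort by the tuple key (-len, word) followed by linear bucketing with a group-first decomposition: bucket the deduplicated words by length with setdefault, then emit keys in descending order and sort each bucket alphabetically on its own.
import Mathlib
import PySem

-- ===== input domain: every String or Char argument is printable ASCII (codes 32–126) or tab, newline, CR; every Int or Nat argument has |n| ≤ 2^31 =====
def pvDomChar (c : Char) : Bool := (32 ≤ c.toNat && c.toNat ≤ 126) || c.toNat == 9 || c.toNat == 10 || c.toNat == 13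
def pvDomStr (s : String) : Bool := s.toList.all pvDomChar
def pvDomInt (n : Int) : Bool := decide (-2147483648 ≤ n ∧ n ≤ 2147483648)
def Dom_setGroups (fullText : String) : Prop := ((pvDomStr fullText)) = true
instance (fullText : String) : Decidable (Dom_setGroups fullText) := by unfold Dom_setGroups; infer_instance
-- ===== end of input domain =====

-- B groups the deduplicated words by length first (setdefault/append) and then sorts the keys
-- descending and each bucket alphabetically, instead of A's single global (-len, word) sort
-- followed by linear bucketing; the return value is proved identical (objective: alternative).

-- ===== PORT A =====
def setGroups (fullText : String) : List (Int × List String) :=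
  -- words = sorted(set([word for word in fullText.split()]), key=lambda item: (-len(item), item))
  let words := PySem.List.sorted2 (PySem.Set.ofList (PySem.Str.split₀ fullText))
      (fun item => -(PySem.Str.len item)) (fun item => item) false
  -- for word in words: if len(word) not in groups: groups[len(word)] = [word] else: groups[len(word)] += [word]
  let groups := words.foldl (fun groups word =>
      if !(groups.contains (PySem.Str.len word)) then
        groups.insert (PySem.Str.len word) [word]
      else
        -- groups[len(word)] += [word]; the key is present here, so getD's default is never used
        groups.modify (PySem.Str.len word) [] (fun v => v ++ [word])) PySem.Dict.empty
  groups.items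

-- ===== PORT B =====
def setGroups_alt (fullText : String) : List (Int × List String) :=
  -- for word in set(fullText.split()): buckets.setdefault(len(word), []).append(word)
  -- (setdefault k [] then append = Dict.modify k [] (· ++ [word]), including key position)
  let buckets := (PySem.Set.ofList (PySem.Str.split₀ fullText)).foldl
      (fun b word => b.modify (PySem.Str.len word) [] (fun v => v ++ [word])) PySem.Dict.empty
  -- {n: sorted(buckets[n]) for n in sorted(buckets, reverse=True)}  (distinct keys → items in that order)
  (PySem.List.sorted buckets.keys (fun n => n) true).map
      (fun n => (n, PySem.List.sorted (buckets.getD n []) (fun w => w) false))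

-- ===== PRECONDITION & SPEC =====
def Spec_setGroups (fullText : String) (out : List (Int × List String)) : Prop := out = setGroups_alt fullText
instance (fullText : String) (out : List (Int × List String)) : Decidable (Spec_setGroups fullText out) := by unfold Spec_setGroups; infer_instance

-- ===== CLAIM (what is proved, stated in full; the proofs are below) =====
def Claim_equal_setGroups : Prop := ∀ (fullText : String), Dom_setGroups fullText → Spec_setGroups fullText (setGroups fullText)

-- ===== LEMMAS AND PROOFS =====

-- the Boolean comparison sorted2 uses for A's key  (-len(item), item)
def wlex (a b : String) : Bool :=
  decide (-(PySem.Str.len a) < -(PySem.Str.len b)) ||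
    (!decide (-(PySem.Str.len b) < -(PySem.Str.len a)) && decide (a < b))

theorem wlex_trans {a b c : String} (h1 : wlex a b = true) (h2 : wlex b c = true) :
    wlex a c = true := by
  simp only [wlex, Bool.or_eq_true, Bool.and_eq_true, Bool.not_eq_eq_eq_not, Bool.not_true,
    decide_eq_true_eq, decide_eq_false_iff_not, not_lt] at *
  rcases h1 with h1 | ⟨h1, h1'⟩ <;> rcases h2 with h2 | ⟨h2, h2'⟩
  · exact Or.inl (lt_trans h1 h2)
  · exact Or.inl (lt_of_lt_of_le h1 h2)
  · exact Or.inl (lt_of_le_of_lt h1 h2)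
  · exact Or.inr ⟨le_trans h1 h2, lt_trans h1' h2'⟩

theorem wlex_total_of_ne {a b : String} (h : a ≠ b) : wlex a b = true ∨ wlex b a = true := by
  simp only [wlex, Bool.or_eq_true, Bool.and_eq_true, Bool.not_eq_eq_eq_not, Bool.not_true,
    decide_eq_true_eq, decide_eq_false_iff_not, not_lt]
  rcases lt_trichotomy (-(PySem.Str.len a)) (-(PySem.Str.len b)) with hl | hl | hl
  · exact Or.inl (Or.inl hl)
  · rcases lt_or_gt_of_ne h with hs | hs
    · exact Or.inl (Or.inr ⟨le_of_eq hl, hs⟩)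
    · exact Or.inr (Or.inr ⟨le_of_eq hl.symm, hs⟩)
  · exact Or.inr (Or.inl hl)

theorem insertBy_wlex_pairwise (x : String) (ys : List String)
    (h : ys.Pairwise (fun a b => wlex a b = true)) (hx : ∀ y ∈ ys, x ≠ y) :
    (PySem.List.insertBy wlex x ys).Pairwise (fun a b => wlex a b = true) := by
  induction ys with
  | nil => simp [PySem.List.insertBy]
  | cons y t ih =>
    rw [List.pairwise_cons] at h
    by_cases hxy : wlex x y = true
    · show (if wlex x y = true then x :: y :: t else _).Pairwise _
      rw [if_pos hxy]
      refine List.Pairwise.cons ?_ (List.Pairwise.cons h.1 h.2)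
      intro z hz
      rcases List.mem_cons.mp hz with rfl | hz
      · exact hxy
      · exact wlex_trans hxy (h.1 z hz)
    · show (if wlex x y = true then x :: y :: t else y :: PySem.List.insertBy wlex x t).Pairwise _
      rw [if_neg hxy]
      refine List.Pairwise.cons ?_ (ih h.2 (fun z hz => hx z (List.mem_cons_of_mem _ hz)))
      intro z hz
      rcases (PySem.List.mem_insertBy wlex x z t).mp hz with rfl | hz
      · rcases wlex_total_of_ne (hx y List.mem_cons_self) with hv | hv
        · exact absurd hv hxy
        · exact hv
      · exact h.1 z hz

theorem foldl_insertBy_wlex_pairwise (xs : List String) (acc : List String)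
    (hnd : xs.Nodup) (hp : acc.Pairwise (fun a b => wlex a b = true))
    (hdis : ∀ a ∈ acc, a ∉ xs) :
    (xs.foldl (fun acc x => PySem.List.insertBy wlex x acc) acc).Pairwise
      (fun a b => wlex a b = true) := by
  induction xs generalizing acc with
  | nil => exact hp
  | cons x t ih =>
    rw [List.nodup_cons] at hnd
    simp only [List.foldl_cons]
    refine ih (PySem.List.insertBy wlex x acc) hnd.2 ?_ ?_
    · exact insertBy_wlex_pairwise x acc hp
        (fun y hy hxy => (hdis y hy) (List.mem_cons.mpr (Or.inl hxy.symm)))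
    · intro a ha
      rcases (PySem.List.mem_insertBy wlex x a acc).mp ha with rfl | ha
      · exact hnd.1
      · exact fun hat => (hdis a ha) (List.mem_cons_of_mem _ hat)

-- A's sorted2 with key (-len(item), item), reverse=False, IS the insertBy fold with wlex
theorem sorted2_eq_foldl (xs : List String) :
    PySem.List.sorted2 xs (fun item => -(PySem.Str.len item)) (fun item => item) false =
      xs.foldl (fun acc x => PySem.List.insertBy wlex x acc) [] := rfl

-- the shared grouping fold
def gfold (l : List String) : PySem.Dict Int (List String) :=
  l.foldl (fun d w => d.modify (PySem.Str.len w) [] (fun v => v ++ [w])) PySem.Dict.empty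

theorem gfold_keys (l : List String) :
    (gfold l).keys = PySem.Set.ofList (l.map (fun w => PySem.Str.len w)) := by
  unfold gfold
  rw [PySem.Dict.keys_foldl_modify_key l (fun w => PySem.Str.len w) []
    (fun d w => fun v => v ++ [w]) PySem.Dict.empty]
  simp [PySem.Dict.keys_empty, PySem.Set.update_nil_left]

theorem gfold_nodup_keys (l : List String) : (gfold l).keys.Nodup := by
  rw [gfold_keys]; exact PySem.Set.nodup_ofList _

theorem gfold_getD (l : List String) (k : Int) :
    (gfold l).getD k [] = l.filter (fun w => PySem.Str.len w == k) := by
  have hg : gfold l = (l.map (fun w => (PySem.Str.len w, w))).foldl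
      (fun d p => d.modify p.1 [] (fun v => v ++ [p.2])) PySem.Dict.empty := by
    unfold gfold; rw [List.foldl_map]
  rw [hg, PySem.Dict.getD_foldl_modify_append]
  simp [List.filter_map, List.map_map, Function.comp_def]

theorem gfold_items (l : List String) :
    (gfold l).items = (PySem.Set.ofList (l.map (fun w => PySem.Str.len w))).map
      (fun k => (k, l.filter (fun w => PySem.Str.len w == k))) := by
  rw [PySem.Dict.items_eq_map_keys (gfold l) (gfold_nodup_keys l) []]
  rw [gfold_keys]
  exact List.map_congr_left (fun k _ => by rw [gfold_getD])

-- A's loop (with its membership test) computes exactly gfold over the sorted word list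
theorem setGroups_eq_gfold (fullText : String) :
    setGroups fullText =
      (gfold (PySem.List.sorted2 (PySem.Set.ofList (PySem.Str.split₀ fullText))
        (fun item => -(PySem.Str.len item)) (fun item => item) false)).items := by
  unfold setGroups gfold
  dsimp only
  congr 1
  apply PySem.List.foldl_congr_mem
  intro d w _
  by_cases h : d.contains (PySem.Str.len w) = true
  · rw [if_neg (by simp only [h, Bool.not_true, Bool.false_eq_true, not_false_eq_true])]
  · have h' : d.contains (PySem.Str.len w) = false := by simpa using h
    rw [if_pos (by simp only [h', Bool.not_false])]
    show d.insert (PySem.Str.len w) [w] =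
      d.insert (PySem.Str.len w) ((d.getD (PySem.Str.len w) []) ++ [w])
    rw [PySem.Dict.getD_of_not_contains d [] h', List.nil_append]

-- descending lengths: deduping the length sequence of A's sorted word list gives the
-- strictly decreasing list of lengths
theorem ofList_pairwise_gt (l : List Int) (h : l.Pairwise (fun a b => b ≤ a)) :
    (PySem.Set.ofList l).Pairwise (fun a b => b < a) := by
  induction l with
  | nil => simp [PySem.Set.ofList]
  | cons x t ih =>
    rw [List.pairwise_cons] at h
    rw [PySem.Set.ofList_cons]
    refine List.Pairwise.cons ?_ ?_
    · intro y hy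
      rcases (PySem.Set.mem_discard (PySem.Set.ofList t) x y).mp hy with ⟨hyt, hne⟩
      exact lt_of_le_of_ne (h.1 y ((PySem.Set.mem_ofList t y).mp hyt)) hne
    · simpa [PySem.Set.discard] using (ih h.2).filter (fun y => !(y == x))

theorem main_equiv (ws : List String) (hnd : ws.Nodup) :
    (gfold (PySem.List.sorted2 ws (fun item => -(PySem.Str.len item)) (fun item => item) false)).items =
      (PySem.List.sorted (gfold ws).keys (fun n => n) true).map
        (fun n => (n, PySem.List.sorted ((gfold ws).getD n []) (fun w => w) false)) := by
  set words := PySem.List.sorted2 ws (fun item => -(PySem.Str.len item)) (fun item => item) false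
    with hwords
  have hperm : words.Perm ws := PySem.List.sorted2_perm ws _ _ false
  have hpw : words.Pairwise (fun a b => wlex a b = true) := by
    rw [hwords, sorted2_eq_foldl]
    exact foldl_insertBy_wlex_pairwise ws [] hnd List.Pairwise.nil (by simp)
  -- keys
  have hkeys : PySem.List.sorted (gfold ws).keys (fun n => n) true =
      PySem.Set.ofList (words.map (fun w => PySem.Str.len w)) := by
    apply PySem.List.sorted_rev_eq_of_perm_of_pairwise_gt
    · rw [gfold_keys]
      rw [List.perm_ext_iff_of_nodup (PySem.Set.nodup_ofList _) (PySem.Set.nodup_ofList _)]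
      intro k
      simp only [PySem.Set.mem_ofList, List.mem_map]
      exact ⟨fun ⟨w, hw, h⟩ => ⟨w, hperm.mem_iff.mp hw, h⟩,
             fun ⟨w, hw, h⟩ => ⟨w, hperm.mem_iff.mpr hw, h⟩⟩
    · apply ofList_pairwise_gt
      refine List.Pairwise.map _ ?_ hpw
      intro a b hab
      simp only [wlex, Bool.or_eq_true, Bool.and_eq_true, decide_eq_true_eq,
        Bool.not_eq_eq_eq_not, Bool.not_true, decide_eq_false_iff_not, not_lt] at hab
      rcases hab with hab | ⟨hab, _⟩ <;> omega
  -- buckets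
  have hbucket : ∀ k : Int, PySem.List.sorted ((gfold ws).getD k []) (fun w => w) false =
      words.filter (fun w => PySem.Str.len w == k) := by
    intro k
    rw [gfold_getD]
    apply PySem.List.sorted_eq_of_perm_of_pairwise_lt
    · exact hperm.filter _
    · refine (hpw.filter _).imp_of_mem ?_
      intro a b ha hb hab
      have ha' : PySem.Str.len a = k := by have := List.of_mem_filter ha; simpa using this
      have hb' : PySem.Str.len b = k := by have := List.of_mem_filter hb; simpa using this
      simp only [wlex, Bool.or_eq_true, Bool.and_eq_true, decide_eq_true_eq,
        Bool.not_eq_eq_eq_not, Bool.not_true, decide_eq_false_iff_not, not_lt] at hab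
      rcases hab with hab | ⟨_, hab⟩
      · omega
      · exact hab
  rw [hkeys, gfold_items]
  exact (List.map_congr_left (fun k _ => by rw [hbucket k])).symm

-- ===== VERDICT (by name: the statement is the Claim_ definition above) =====
theorem setGroups_spec : Claim_equal_setGroups := by
  intro fullText _
  show setGroups fullText = setGroups_alt fullText
  rw [setGroups_eq_gfold]
  unfold setGroups_alt
  exact main_equiv _ (PySem.Set.nodup_ofList _)
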